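-- pv_equiv track=rewrite | github.com/sudhamshu091/Daily-Dose-of-Python-Coding | Qsn_58/dictOperations.py | dictOperations
-- ===== SOURCE A (Python) =====
-- import operator
--
-- def dictOperations(d1,d2,d3,new_values):
--     d1.update(new_values)
--     d4 = {}
--     for d in (d1,d2,d3):
--         d4.update(d)
--     descending_sorted = dict(sorted(d4.items(), key = operator.itemgetter(0), reverse = True))
--     ascending_sorted = dict(sorted(d4.items(), key = operator.itemgetter(0)))
--     return ascending_sorted,descending_sorted
-- ===== SOURCE B (Python) =====
-- def _upsert(asc, k, v):
--     # binary search for the leftmost position whose key is >= k,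
--     # then overwrite in place or insert there
--     lo, hi = 0, len(asc)
--     while lo < hi:
--         mid = (lo + hi) // 2
--         if asc[mid][0] < k:
--             lo = mid + 1
--         else:
--             hi = mid
--     if lo < len(asc) and asc[lo][0] == k:
--         asc[lo] = (k, v)
--     else:
--         asc.insert(lo, (k, v))
--
-- def dictOperations(d1, d2, d3, new_values):
--     d1.update(new_values)
--     asc = []
--     for d in (d1, d2, d3):
--         for k, v in d.items():
--             _upsert(asc, k, v)
--     return dict(asc), dict(reversed(asc))
-- ===== Notes on version B (the rewrite author's own statement) =====
-- stated objective: alternative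
-- what changed: B drops the merge-into-a-dict-then-library-sort-twice pipeline: it streams the items of the three dicts through a hand-written binary-search insert/overwrite that maintains a single key-sorted association list, then reads the ascending dict straight off that list and the descending one off its reversal.
import Mathlib
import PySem

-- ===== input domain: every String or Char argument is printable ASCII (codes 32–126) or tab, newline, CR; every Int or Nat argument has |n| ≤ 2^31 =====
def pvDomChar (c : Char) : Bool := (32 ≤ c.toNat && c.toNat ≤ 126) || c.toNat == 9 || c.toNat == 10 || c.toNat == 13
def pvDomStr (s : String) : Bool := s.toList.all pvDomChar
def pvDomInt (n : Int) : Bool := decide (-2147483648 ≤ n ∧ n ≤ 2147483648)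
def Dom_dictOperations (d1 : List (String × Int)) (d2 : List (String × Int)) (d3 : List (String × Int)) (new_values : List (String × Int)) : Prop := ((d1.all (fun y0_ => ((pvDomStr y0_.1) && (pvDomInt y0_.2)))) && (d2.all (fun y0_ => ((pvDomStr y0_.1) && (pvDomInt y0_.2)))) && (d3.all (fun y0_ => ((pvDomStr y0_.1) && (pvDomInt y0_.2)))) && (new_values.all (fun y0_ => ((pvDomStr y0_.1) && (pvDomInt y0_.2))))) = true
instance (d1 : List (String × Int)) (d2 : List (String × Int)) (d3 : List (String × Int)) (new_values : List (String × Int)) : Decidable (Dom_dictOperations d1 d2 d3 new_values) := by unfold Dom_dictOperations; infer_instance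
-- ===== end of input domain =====

-- B replaces A's merge-into-a-dict-then-sort-twice pipeline by streaming all items through
-- a binary-search insert/overwrite into one key-sorted association list (objective: alternative).
-- A mutates its argument d1 in place (B performs the same mutation in Python); the
-- equivalence proved here is about the return value only.

-- ===== PORT A =====
-- Port of A: merge by a loop of dict.update calls, then sort the items twice
-- (descending with reverse=True, then ascending).
def dictOperations (d1 : List (String × Int)) (d2 : List (String × Int)) (d3 : List (String × Int)) (new_values : List (String × Int)) : (List (String × Int)) × (List (String × Int)) :=
  let d1m := (PySem.Dict.ofList d1).update new_values          -- d1.update(new_values)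
  let d4a := PySem.Dict.empty.update d1m.items                 -- d4 = {}; d4.update(d1)
  let d4b := d4a.update d2                                     -- d4.update(d2)
  let d4 := d4b.update d3                                      -- d4.update(d3)
  let descending_sorted := PySem.Dict.ofList (PySem.List.sorted d4.items (fun p => p.1) true)
  let ascending_sorted := PySem.Dict.ofList (PySem.List.sorted d4.items (fun p => p.1) false)
  (ascending_sorted.items, descending_sorted.items)

-- ===== PORT B =====
-- B's hand-written lower-bound binary search (the while loop of _upsert), step for step;
-- asc[mid] is read with getD — mid is always in range while lo < hi ≤ len(asc),
-- so this is exact where the Python executes.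
def pvBisect (asc : List (String × Int)) (k : String) (lo hi : Nat) : Nat :=
  if _h : lo < hi then
    let mid := (lo + hi) / 2
    if (asc.getD mid ("", 0)).1 < k then pvBisect asc k (mid + 1) hi
    else pvBisect asc k lo mid
  else lo
termination_by hi - lo
decreasing_by all_goals omega

-- _upsert: find the leftmost position with key ≥ k, then overwrite in place or insert.
def pvUpsert (asc : List (String × Int)) (k : String) (v : Int) : List (String × Int) :=
  let i := pvBisect asc k 0 asc.length
  if h : i < asc.length then
    if (asc[i]'h).1 == k then asc.set i (k, v)    -- asc[i] = (k, v)
    else asc.insertIdx i (k, v)                    -- asc.insert(i, (k, v))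
  else asc.insertIdx i (k, v)

-- Port of B: stream the three dicts' items through _upsert into one key-sorted
-- association list, then read both result dicts off it (descending = reverse).
def dictOperations_alt (d1 : List (String × Int)) (d2 : List (String × Int)) (d3 : List (String × Int)) (new_values : List (String × Int)) : (List (String × Int)) × (List (String × Int)) :=
  let d1m := (PySem.Dict.ofList d1).update new_values          -- d1.update(new_values)
  let asc := (d1m.items ++ d2 ++ d3).foldl (fun s kv => pvUpsert s kv.1 kv.2) []
  ((PySem.Dict.ofList asc).items, (PySem.Dict.ofList asc.reverse).items)

-- ===== PRECONDITION & SPEC =====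
def Spec_dictOperations (d1 : List (String × Int)) (d2 : List (String × Int)) (d3 : List (String × Int)) (new_values : List (String × Int)) (out : (List (String × Int)) × (List (String × Int))) : Prop := out = dictOperations_alt d1 d2 d3 new_values
instance (d1 : List (String × Int)) (d2 : List (String × Int)) (d3 : List (String × Int)) (new_values : List (String × Int)) (out : (List (String × Int)) × (List (String × Int))) : Decidable (Spec_dictOperations d1 d2 d3 new_values out) := by unfold Spec_dictOperations; infer_instance

-- ===== CLAIM =====
def Claim_equal_dictOperations : Prop := ∀ (d1 : List (String × Int)) (d2 : List (String × Int)) (d3 : List (String × Int)) (new_values : List (String × Int)), Dom_dictOperations d1 d2 d3 new_values → Spec_dictOperations d1 d2 d3 new_values (dictOperations d1 d2 d3 new_values)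

-- ===== LEMMAS AND PROOFS =====

-- Proof-side reference form of _upsert: the linear scan-and-splice recursion.
def pvUpsertRec (asc : List (String × Int)) (k : String) (v : Int) : List (String × Int) :=
  match asc with
  | [] => [(k, v)]
  | p :: rest =>
    if p.1 < k then p :: pvUpsertRec rest k v
    else if p.1 == k then (k, v) :: rest
    else (k, v) :: p :: rest

-- A's update loop is one merged update.
theorem pv_merge_eq (xs ys zs : List (String × Int)) :
    ((PySem.Dict.empty.update xs).update ys).update zs = PySem.Dict.empty.update (xs ++ ys ++ zs) := by
  simp [PySem.Dict.update, List.foldl_append]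

-- On a strictly key-sorted list the binary search returns the index of the first
-- key ≥ k (the length of the prefix of keys < k).
theorem pv_bisect_eq (asc : List (String × Int)) (k : String)
    (hs : asc.Pairwise (fun a b => a.1 < b.1)) :
    ∀ fuel lo hi, hi - lo ≤ fuel → lo ≤ hi → hi ≤ asc.length →
    (∀ j, j < asc.length → j < lo → (asc.getD j ("", 0)).1 < k) →
    (∀ j, j < asc.length → hi ≤ j → ¬ (asc.getD j ("", 0)).1 < k) →
    pvBisect asc k lo hi = asc.findIdx (fun p => !decide (p.1 < k)) := by
  have hmono : ∀ i j (hi : i < asc.length) (hj : j < asc.length), i < j →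
      (asc[i]'hi).1 < (asc[j]'hj).1 := by
    intro i j hi hj hij
    exact List.pairwise_iff_getElem.mp hs i j hi hj hij
  have ht_le : asc.findIdx (fun p => !decide (p.1 < k)) ≤ asc.length :=
    List.findIdx_le_length
  have hF1 : ∀ j (hj : j < asc.length),
      j < asc.findIdx (fun p => !decide (p.1 < k)) → (asc[j]'hj).1 < k := by
    intro j hj hjt
    have := List.not_of_lt_findIdx hjt
    simpa using this
  have hF2 : ∀ (ht : asc.findIdx (fun p => !decide (p.1 < k)) < asc.length),
      ¬ (asc[asc.findIdx (fun p => !decide (p.1 < k))]'ht).1 < k := by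
    intro ht
    have := List.findIdx_getElem (w := ht)
    simpa using this
  intro fuel
  induction fuel with
  | zero =>
    intro lo hi hf hlh hhl hP hQ
    have hlo : lo = hi := by omega
    rw [pvBisect, dif_neg (by omega)]
    set t := asc.findIdx (fun p => !decide (p.1 < k)) with htdef
    rcases Nat.lt_trichotomy lo t with h | h | h
    · have hlen : lo < asc.length := lt_of_lt_of_le h ht_le
      have hp := hF1 lo hlen h
      have hq := hQ lo hlen (by omega)
      rw [List.getD_eq_getElem _ _ hlen] at hq
      exact absurd hp hq
    · exact h
    · have hlen : t < asc.length := by omega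
      have hq := hF2 hlen
      have hp := hP t hlen h
      rw [List.getD_eq_getElem _ _ hlen] at hp
      exact absurd hp hq
  | succ n ih =>
    intro lo hi hf hlh hhl hP hQ
    by_cases hlt : lo < hi
    · rw [pvBisect, dif_pos hlt]
      have hmidlt : (lo + hi) / 2 < asc.length := by omega
      by_cases hm : (asc.getD ((lo + hi) / 2) ("", 0)).1 < k
      · rw [if_pos hm]
        refine ih ((lo + hi) / 2 + 1) hi (by omega) (by omega) hhl ?_ hQ
        intro j hj hjlo
        rw [List.getD_eq_getElem _ _ hj]
        rcases Nat.lt_or_ge j ((lo + hi) / 2) with h' | h'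
        · have := hmono j ((lo + hi) / 2) hj hmidlt h'
          rw [List.getD_eq_getElem _ _ hmidlt] at hm
          exact lt_trans this hm
        · have : j = (lo + hi) / 2 := by omega
          subst this
          rwa [List.getD_eq_getElem _ _ hj] at hm
      · rw [if_neg hm]
        refine ih lo ((lo + hi) / 2) (by omega) (by omega) (by omega) hP ?_
        intro j hj hjhi
        rw [List.getD_eq_getElem _ _ hj]
        rcases Nat.lt_or_ge ((lo + hi) / 2) j with h' | h'
        · have := hmono ((lo + hi) / 2) j hmidlt hj h'
          rw [List.getD_eq_getElem _ _ hmidlt] at hm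
          intro hcon
          exact hm (lt_trans this hcon)
        · have : j = (lo + hi) / 2 := by omega
          subst this
          rwa [List.getD_eq_getElem _ _ hj] at hm
    · have h0 : hi - lo ≤ n := by omega
      exact ih lo hi h0 hlh hhl hP hQ

-- With the binary search resolved, B's _upsert is the scan-and-splice recursion.
theorem pv_upsert_eq_rec (asc : List (String × Int)) (k : String) (v : Int)
    (hs : asc.Pairwise (fun a b => a.1 < b.1)) :
    pvUpsert asc k v = pvUpsertRec asc k v := by
  have hb : pvBisect asc k 0 asc.length = asc.findIdx (fun p => !decide (p.1 < k)) :=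
    pv_bisect_eq asc k hs asc.length 0 asc.length (by omega) (by omega) le_rfl
      (by intro j _ h; omega) (by intro j hj h; omega)
  unfold pvUpsert
  rw [hb]
  clear hb
  induction asc with
  | nil => simp [pvUpsertRec]
  | cons p rest ih =>
    by_cases h1 : p.1 < k
    · have htw : (p :: rest).findIdx (fun p => !decide (p.1 < k))
          = rest.findIdx (fun p => !decide (p.1 < k)) + 1 := by
        rw [List.findIdx_cons]
        simp [h1]
      have ihr := ih ((List.pairwise_cons.mp hs).2)
      simp only [pvUpsertRec, if_pos h1, htw, List.length_cons]
      by_cases h2 : rest.findIdx (fun p => !decide (p.1 < k)) < rest.length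
      · rw [dif_pos h2] at ihr
        rw [dif_pos (by omega :
          rest.findIdx (fun p => !decide (p.1 < k)) + 1 < rest.length + 1)]
        simp only [List.getElem_cons_succ, List.set_cons_succ, List.insertIdx_succ_cons]
        by_cases h3 : (rest[rest.findIdx (fun p => !decide (p.1 < k))]'h2).1 == k
        · rw [if_pos h3]; rw [if_pos h3] at ihr; rw [ihr]
        · rw [if_neg h3]; rw [if_neg h3] at ihr; rw [ihr]
      · rw [dif_neg h2] at ihr
        rw [dif_neg (by omega :
          ¬ rest.findIdx (fun p => !decide (p.1 < k)) + 1 < rest.length + 1)]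
        rw [List.insertIdx_succ_cons, ihr]
    · have htw : (p :: rest).findIdx (fun p => !decide (p.1 < k)) = 0 := by
        rw [List.findIdx_cons]
        simp [h1]
      simp only [htw]
      rw [dif_pos (by simp)]
      by_cases h2 : p.1 == k
      · simp only [pvUpsertRec, if_neg h1, List.getElem_cons_zero, if_pos h2]
        rfl
      · simp only [pvUpsertRec, if_neg h1, List.getElem_cons_zero, if_neg h2]
        rfl

-- Membership: an element of the scan-and-splice result is the new pair or an old one.
theorem pv_mem_upsert (s : List (String × Int)) (k : String) (v : Int) (b : String × Int)
    (hb : b ∈ pvUpsertRec s k v) : b = (k, v) ∨ b ∈ s := by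
  induction s with
  | nil => simpa [pvUpsertRec] using hb
  | cons p rest ih =>
    by_cases h1 : p.1 < k
    · simp only [pvUpsertRec, if_pos h1] at hb
      rcases List.mem_cons.mp hb with hb | hb
      · exact Or.inr (by simp [hb])
      · rcases ih hb with h' | h'
        · exact Or.inl h'
        · exact Or.inr (List.mem_cons_of_mem _ h')
    · by_cases h2 : p.1 == k
      · simp only [pvUpsertRec, if_neg h1, if_pos h2] at hb
        rcases List.mem_cons.mp hb with hb | hb
        · exact Or.inl (by simp [hb])
        · exact Or.inr (List.mem_cons_of_mem _ hb)
      · simp only [pvUpsertRec, if_neg h1, if_neg h2] at hb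
        rcases List.mem_cons.mp hb with hb | hb
        · exact Or.inl (by simp [hb])
        · exact Or.inr hb

-- _upsert keeps the list strictly key-sorted.
theorem pv_upsert_pairwise (s : List (String × Int)) (k : String) (v : Int)
    (h : s.Pairwise (fun a b => a.1 < b.1)) :
    (pvUpsertRec s k v).Pairwise (fun a b => a.1 < b.1) := by
  induction s with
  | nil => simp [pvUpsertRec]
  | cons p rest ih =>
    rcases List.pairwise_cons.mp h with ⟨hp, hrest⟩
    by_cases h1 : p.1 < k
    · simp only [pvUpsertRec, if_pos h1]
      refine List.pairwise_cons.mpr ⟨?_, ih hrest⟩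
      intro b hb
      rcases pv_mem_upsert rest k v b hb with rfl | hmem
      · exact h1
      · exact hp b hmem
    · by_cases h2 : p.1 == k
      · have hk : p.1 = k := by simpa using h2
        simp only [pvUpsertRec, if_neg h1, if_pos h2]
        exact List.pairwise_cons.mpr ⟨fun b hb => hk ▸ hp b hb, hrest⟩
      · have hk : k < p.1 := by
          rcases lt_trichotomy p.1 k with h' | h' | h'
          · exact absurd h' h1
          · exact absurd (by simp [h']) h2
          · exact h'
        simp only [pvUpsertRec, if_neg h1, if_neg h2]
        refine List.pairwise_cons.mpr ⟨?_, h⟩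
        intro b hb
        rcases List.mem_cons.mp hb with rfl | hb
        · exact hk
        · exact lt_trans hk (hp b hb)

-- When k is not a key of s, _upsert is a mere insertion: a permutation of (k, v) :: s.
theorem pv_upsert_perm_of_not_mem (s : List (String × Int)) (k : String) (v : Int)
    (h : k ∉ s.map Prod.fst) : (pvUpsertRec s k v).Perm ((k, v) :: s) := by
  induction s with
  | nil => simp [pvUpsertRec]
  | cons p rest ih =>
    have hne : p.1 ≠ k := fun he => h (by simp [he])
    by_cases h1 : p.1 < k
    · simp only [pvUpsertRec, if_pos h1]
      have hrec := ih (fun hm => h (by simp at hm ⊢; exact Or.inr hm))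
      exact (hrec.cons p).trans (List.Perm.swap _ _ _)
    · have h2 : (p.1 == k) = false := by simpa using hne
      simp only [pvUpsertRec, if_neg h1, h2]
      simp

-- When k IS a key of the strictly sorted s, _upsert overwrites in place:
-- it equals the pointwise replacement Dict.insert performs on the items list.
theorem pv_upsert_eq_map_of_mem (s : List (String × Int)) (k : String) (v : Int)
    (hs : s.Pairwise (fun a b => a.1 < b.1)) (h : k ∈ s.map Prod.fst) :
    pvUpsertRec s k v = s.map (fun p => if p.1 == k then (k, v) else p) := by
  induction s with
  | nil => simp at h
  | cons p rest ih =>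
    rcases List.pairwise_cons.mp hs with ⟨hp, hrest⟩
    by_cases h1 : p.1 < k
    · have hne : (p.1 == k) = false := by simp; exact ne_of_lt h1
      have hm : k ∈ rest.map Prod.fst := by
        rcases List.mem_map.mp h with ⟨q, hq, hk⟩
        rcases List.mem_cons.mp hq with rfl | hq
        · exact absurd hk (by simpa using hne)
        · exact List.mem_map.mpr ⟨q, hq, hk⟩
      simp only [pvUpsertRec, if_pos h1, List.map_cons, hne, Bool.false_eq_true, if_false]
      rw [ih hrest hm]
    · by_cases h2 : p.1 == k
      · have hk : p.1 = k := by simpa using h2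
        simp only [pvUpsertRec, if_neg h1, if_pos h2, List.map_cons]
        congr 1
        have hall : ∀ q ∈ rest, (q.1 == k) = false := by
          intro q hq
          simp only [beq_eq_false_iff_ne, ne_eq]
          exact fun he => absurd (hp q hq) (by simp [he, hk])
        calc rest = rest.map id := by simp
          _ = rest.map (fun p => if p.1 == k then (k, v) else p) := by
              apply List.map_congr_left; intro q hq; simp [hall q hq]
      · exfalso
        have hk : k < p.1 := by
          rcases lt_trichotomy p.1 k with h' | h' | h'
          · exact absurd h' h1
          · exact absurd (by simp [h']) h2
          · exact h'
        rcases List.mem_map.mp h with ⟨q, hq, hqk⟩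
        rcases List.mem_cons.mp hq with rfl | hq
        · exact absurd (by simp [hqk]) h2
        · have hlt : p.1 < k := by have := hp q hq; rwa [hqk] at this
          exact absurd hlt (lt_asymm hk)

-- Strict key order of the ascending sort, from ≤-order plus distinct keys.
theorem pv_sorted_pairwise_lt (l : List (String × Int)) (h : (l.map Prod.fst).Nodup) :
    (PySem.List.sorted l (fun p => p.1) false).Pairwise (fun a b => a.1 < b.1) := by
  have hle := PySem.List.sorted_pairwise l (fun p => p.1)
  have hnd : ((PySem.List.sorted l (fun p => p.1) false).map Prod.fst).Nodup :=
    (((PySem.List.sorted_perm l _ false).map _).nodup_iff).mpr h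
  have hne := List.pairwise_map.mp hnd
  exact (hle.and hne).imp (fun hp => lt_of_le_of_ne hp.1 hp.2)

-- Key step: upserting into the sorted item list = sorting after a Dict.insert.
theorem pv_upsert_sorted (d : PySem.Dict String Int) (k : String) (v : Int)
    (hnd : d.keys.Nodup) :
    pvUpsert (PySem.List.sorted d.items (fun p => p.1) false) k v
      = PySem.List.sorted (d.insert k v).items (fun p => p.1) false := by
  have hndi : (d.items.map Prod.fst).Nodup := by simpa [PySem.Dict.keys] using hnd
  set S := PySem.List.sorted d.items (fun p => p.1) false with hS
  have hSperm : S.Perm d.items := PySem.List.sorted_perm _ _ _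
  have hSlt : S.Pairwise (fun a b => a.1 < b.1) := pv_sorted_pairwise_lt _ hndi
  rw [pv_upsert_eq_rec S k v hSlt]
  have hkeys : k ∈ S.map Prod.fst ↔ d.contains k = true := by
    rw [List.mem_map]
    constructor
    · rintro ⟨q, hq, rfl⟩
      have hqd : q ∈ d.items := hSperm.mem_iff.mp hq
      exact (PySem.Dict.contains_iff_mem_keys _ _).mpr (by
        simp only [PySem.Dict.keys]; exact List.mem_map.mpr ⟨q, hqd, rfl⟩)
    · intro hc
      have hm : k ∈ d.keys := (PySem.Dict.contains_iff_mem_keys _ _).mp hc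
      simp only [PySem.Dict.keys] at hm
      rcases List.mem_map.mp hm with ⟨q, hq, hk⟩
      exact ⟨q, hSperm.mem_iff.mpr hq, hk⟩
  symm
  apply PySem.List.sorted_eq_of_perm_of_pairwise_lt
  · by_cases hc : d.contains k = true
    · rw [pv_upsert_eq_map_of_mem S k v hSlt (hkeys.mpr hc),
        PySem.Dict.items_insert_of_contains _ _ hc]
      exact hSperm.map _
    · have hc' : d.contains k = false := by simpa using hc
      have h1 := pv_upsert_perm_of_not_mem S k v (fun hm => hc (hkeys.mp hm))
      rw [PySem.Dict.items_insert_of_not_contains _ _ hc']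
      exact (h1.trans (hSperm.cons _)).trans
        (by simpa using (List.perm_append_comm (l₁ := [(k, v)]) (l₂ := d.items)))
  · exact pv_upsert_pairwise S k v hSlt

-- The whole upsert fold computes the ascending sort of the merged dict's items.
theorem pv_fold_upsert (xs : List (String × Int)) :
    xs.foldl (fun s kv => pvUpsert s kv.1 kv.2) []
      = PySem.List.sorted (PySem.Dict.empty.update xs).items (fun p => p.1) false := by
  induction xs using List.reverseRecOn with
  | nil =>
    have h0 : (PySem.Dict.empty.update ([] : List (String × Int))).items = [] := by
      simp [PySem.Dict.update, PySem.Dict.empty]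
    simp [h0, PySem.List.sorted, pvUpsert]
  | append_singleton xs p ih =>
    have hstep : PySem.Dict.empty.update (xs ++ [p])
        = (PySem.Dict.empty.update xs).insert p.1 p.2 := by
      simp [PySem.Dict.update, List.foldl_append]
    rw [List.foldl_append, List.foldl_cons, List.foldl_nil, ih, hstep,
      pv_upsert_sorted _ _ _ (PySem.Dict.nodup_keys_update _ _ PySem.Dict.nodup_keys_empty)]

-- On an item list with distinct keys, the reverse=True sort is the reverse of the ascending sort.
theorem pv_sorted_rev_of_nodup (l : List (String × Int)) (h : (l.map (fun p => p.1)).Nodup) :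
    PySem.List.sorted l (fun p => p.1) true
      = (PySem.List.sorted l (fun p => p.1) false).reverse := by
  apply PySem.List.sorted_rev_eq_of_perm_of_pairwise_gt
  · exact (List.reverse_perm _).trans (PySem.List.sorted_perm l _ false)
  · rw [List.pairwise_reverse]
    exact pv_sorted_pairwise_lt l (by simpa using h)

-- ===== VERDICT =====
theorem dictOperations_spec : Claim_equal_dictOperations := by
  intro d1 d2 d3 new_values _
  unfold Spec_dictOperations dictOperations dictOperations_alt
  simp only [pv_merge_eq, pv_fold_upsert]
  have hndi : ∀ (l : List (String × Int)),
      ((PySem.Dict.empty.update l).items.map (fun p : String × Int => p.1)).Nodup := fun l => by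
    simpa [PySem.Dict.keys] using
      (PySem.Dict.nodup_keys_update _ _ PySem.Dict.nodup_keys_empty :
        (PySem.Dict.empty.update l).keys.Nodup)
  rw [pv_sorted_rev_of_nodup _ (hndi _)]
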